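-- pv_equiv track=rewrite | github.com/YaswanthKumarKaja/TCS-codevita-solutions | Dole Out Cadbury.py | count_from
-- ===== SOURCE A (Python) =====
-- dp = {}
--
-- def count_from(i, j):
--     min_side = min(i, j)
--     max_side = max(i, j)
--
--     if min_side == 0:
--         return 0
--     if min_side == 1:
--         return i * j
--
--     curr_pair = (min_side, max_side)
--
--     if curr_pair in dp:
--         return dp[curr_pair]
--
--     curr_square = min_side * min_side
--     num_squares = max_side // min_side
--     new_side = max_side % min_side
--
--     total = num_squares + count_from(min_side, new_side)
--     dp[curr_pair] = total
--
--     return total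
-- ===== SOURCE B (Python) =====
-- def count_from(i, j):
--     # Full Euclidean quotient chain of (max, min), collected first, then summed.
--     # No special base for min == 1: the last quotient there is max itself,
--     # which equals i*j at that level, so the plain chain gives the same total.
--     a, b = max(i, j), min(i, j)
--     quotients = []
--     while b:
--         quotients.append(a // b)
--         a, b = b, a % b
--     return sum(quotients)
-- ===== Notes on version B (the rewrite author's own statement) =====
-- stated objective: alternative
-- what changed: Replaced the memoized recursion (with its min==1 shortcut returning i*j) by a staged computation: one plain Euclidean loop collects the full quotient chain into a list, then the list is summed; the memo dict and the min==1 base case disappear.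
import Mathlib
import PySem

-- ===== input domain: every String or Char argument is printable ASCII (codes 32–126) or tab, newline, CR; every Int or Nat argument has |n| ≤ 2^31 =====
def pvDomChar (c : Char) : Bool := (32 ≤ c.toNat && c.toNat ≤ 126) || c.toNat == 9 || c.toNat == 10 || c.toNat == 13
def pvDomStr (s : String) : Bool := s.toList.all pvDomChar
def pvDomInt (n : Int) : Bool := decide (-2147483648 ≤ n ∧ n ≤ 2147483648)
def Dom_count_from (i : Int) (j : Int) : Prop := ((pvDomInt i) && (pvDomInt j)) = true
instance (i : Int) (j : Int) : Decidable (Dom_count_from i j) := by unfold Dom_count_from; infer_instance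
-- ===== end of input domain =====

-- B replaces A's memoized recursion (with a min==1 shortcut) by a plain Euclidean
-- loop that collects the whole quotient chain into a list and then sums it
-- (objective: alternative decomposition).


-- ===== PORT A =====
-- A's recursion: min==0 -> 0; min==1 -> i*j; else max//min + count_from(min, max%min).
-- The global memo dict dp only caches values and never changes a result, so the port
-- omits it. Python A recurses forever (RecursionError) for negative arguments, so the
-- port works on the Nat images of the arguments; Pre_ restricts to nonnegative inputs.
def goA_count_from (a b : Nat) : Int :=
  let mn := min a b
  let mx := max a b
  if mn = 0 then 0
  else if mn = 1 then (a : Int) * (b : Int)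
  else ((mx / mn : Nat) : Int) + goA_count_from mn (mx % mn)
termination_by min a b
decreasing_by
  have h1 : max a b % min a b < min a b := Nat.mod_lt _ (by omega)
  omega

def count_from (i : Int) (j : Int) : Int := goA_count_from i.toNat j.toNat

-- ===== PORT B =====
-- B, stage 1: the while loop collecting the Euclidean quotient chain of (a, b), b ≤ a.
def quots_count_from (a b : Nat) : List Nat :=
  if b = 0 then []
  else a / b :: quots_count_from b (a % b)
termination_by b
decreasing_by exact Nat.mod_lt _ (by omega)

-- B, stage 2: sum the collected list.
def count_from_alt (i : Int) (j : Int) : Int :=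
  ((quots_count_from (max i.toNat j.toNat) (min i.toNat j.toNat)).sum : Nat)

-- ===== PRECONDITION & SPEC =====
-- Pre_ excludes negative arguments: there Python A recurses without progress and
-- raises RecursionError (and Python B loops forever).
def Pre_count_from (i : Int) (j : Int) : Prop := 0 ≤ i ∧ 0 ≤ j
instance (i : Int) (j : Int) : Decidable (Pre_count_from i j) := by unfold Pre_count_from; infer_instance
def pvWitness_count_from : Int × Int := (12, 30)

def Spec_count_from (i : Int) (j : Int) (out : Int) : Prop := out = count_from_alt i j
instance (i : Int) (j : Int) (out : Int) : Decidable (Spec_count_from i j out) := by unfold Spec_count_from; infer_instance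

-- ===== CLAIM (what is proved, stated in full; the proofs are below) =====
def Claim_equal_count_from : Prop := ∀ (i : Int) (j : Int), Dom_count_from i j → Pre_count_from i j → Spec_count_from i j (count_from i j)

-- ===== LEMMAS AND PROOFS =====

-- A's recursion equals the sum of B's quotient chain of (max, min).
theorem goA_eq_sum_quots (a b : Nat) :
    goA_count_from a b = ((quots_count_from (max a b) (min a b)).sum : Nat) := by
  induction a, b using goA_count_from.induct with
  | case1 a b c hc =>
      have h0 : min a b = 0 := hc
      rw [goA_count_from, quots_count_from]
      simp [h0]
  | case2 a b c hc0 hc1 =>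
      have h1 : min a b = 1 := hc1
      have hmx : max a b = a * b := by
        have := min_mul_max a b
        rw [h1, one_mul] at this
        exact this
      have hq : quots_count_from (max a b) (min a b) = [max a b] := by
        rw [h1, quots_count_from, quots_count_from]
        simp [Nat.mod_one]
      rw [goA_count_from, hq]
      simp [h1, hmx]
  | case3 a b c d hc0 hc1 ih =>
      have h0 : ¬ min a b = 0 := hc0
      have h1 : ¬ min a b = 1 := hc1
      have hih : goA_count_from (min a b) (max a b % min a b)
          = ((quots_count_from (max (min a b) (max a b % min a b)) (min (min a b) (max a b % min a b))).sum : Nat) := ih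
      have hlt : max a b % min a b < min a b := Nat.mod_lt _ (by omega)
      have hmin : min (min a b) (max a b % min a b) = max a b % min a b := by omega
      have hmax : max (min a b) (max a b % min a b) = min a b := by omega
      rw [hmin, hmax] at hih
      rw [goA_count_from, quots_count_from]
      simp only [h0, if_neg, not_false_iff]
      rw [if_neg h1, hih]
      simp

-- ===== VERDICT (by name: the statement is the Claim_ definition above) =====
theorem count_from_spec : Claim_equal_count_from := by
  intro i j _ _
  unfold Spec_count_from count_from count_from_alt
  exact goA_eq_sum_quots _ _
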